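-- pv_equiv track=rewrite | github.com/AdamZhouSE/pythonHomework | Code/CodeRecords/2585/58616/313983.py | caTransform
-- ===== SOURCE A (Python) =====
-- def caTransform(start, end):
--     n=len(start)
--     if len(end)!=n:
--         return False
--     i=j=0
--     start+='A'
--     end+='A'
--     while i<n and j<n:
--         while start[i]=='X':i=i+1
--         while end[j]=='X':j=j+1
--         if start[i]!=end[j]:
--             return False
--         if start[i]=='R' and i>j:
--             return False
--         if start[i]=='L' and i<j:
--             return False
--         i+=1
--         j+=1
--     return True
-- ===== SOURCE B (Python) =====
-- def caTransform(start, end):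
--     if len(start) != len(end):
--         return False
--     if [c for c in start if c != 'X'] != [c for c in end if c != 'X']:
--         return False
--     ls = rs = le = re = 0
--     for a, b in zip(start, end):
--         if a == 'L':
--             ls += 1
--         if a == 'R':
--             rs += 1
--         if b == 'L':
--             le += 1
--         if b == 'R':
--             re += 1
--         if ls > le or re > rs:
--             return False
--     return True
-- ===== Notes on version B (the rewrite author's own statement) =====
-- stated objective: alternative
-- what changed: B replaces A's interleaved two-pointer skip-scan by a counting-invariant algorithm: it compares the strings with 'X' removed and then sweeps both strings in lockstep maintaining four running L/R counters, rejecting whenever a prefix of start has more L's than the same prefix of end or fewer R's; no positions are stored or matched.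
-- intended difference: On equal-length inputs whose non-'X' subsequences match pairwise but have different lengths, and where A's sentinel scan never notices the surplus (the shorter string's last non-'X' character sits at the final position, e.g. A('RR','XR') is True, or the first surplus non-'X' character is a literal 'A' colliding with A's sentinel, e.g. A('RA','RX') is True), A returns True; B returns False, the intended answer, since strings with different numbers of non-'X' characters are never transformable into each other. — e.g. on caTransform("RR", "XR"): A returns true, B returns false
import Mathlib
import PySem

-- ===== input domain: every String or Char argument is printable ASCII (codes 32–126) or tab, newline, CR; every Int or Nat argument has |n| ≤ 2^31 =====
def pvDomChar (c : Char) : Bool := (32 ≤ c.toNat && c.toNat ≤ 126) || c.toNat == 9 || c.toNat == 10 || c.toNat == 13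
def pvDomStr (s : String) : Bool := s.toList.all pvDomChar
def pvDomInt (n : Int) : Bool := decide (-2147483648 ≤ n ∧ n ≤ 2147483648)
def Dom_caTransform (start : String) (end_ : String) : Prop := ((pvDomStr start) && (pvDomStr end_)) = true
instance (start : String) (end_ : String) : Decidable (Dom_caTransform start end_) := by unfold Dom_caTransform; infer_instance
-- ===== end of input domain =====

-- B replaces A's two-pointer skip-scan by an X-erased comparison plus a lockstep sweep with
-- four running L/R counters (a counting-invariant algorithm, no positions stored);
-- B differs from A only on the corner stated at D_ below.

-- ===== PORT A =====
-- 'while start[i]=="X": i=i+1' — the sentinel 'A' appended at position n stops the scan, so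
-- the index stays in range and getD is exact here; the fuel (= length of the extended string)
-- is a totality guard the scan never exhausts.
def skipA (u : List Char) : Nat → Nat → Nat
  | 0, i => i
  | f + 1, i => if u.getD i 'A' = 'X' then skipA u f (i + 1) else i

-- the outer 'while i<n and j<n' of A (fuel n+1 bounds the iteration count: i grows each turn)
def loopA (su tu : List Char) (n : Nat) : Nat → Nat → Nat → Bool
  | 0, _, _ => true
  | f + 1, i, j =>
    if i < n ∧ j < n then
      let i' := skipA su su.length i
      let j' := skipA tu tu.length j
      let c := su.getD i' 'A'
      let d := tu.getD j' 'A'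
      if c ≠ d then false
      else if c = 'R' ∧ j' < i' then false
      else if c = 'L' ∧ i' < j' then false
      else loopA su tu n f (i' + 1) (j' + 1)
    else true

def caTransform (start : String) (end_ : String) : Bool :=
  let s := start.toList
  let t := end_.toList
  let n := s.length
  if t.length ≠ n then false
  else loopA (s ++ ['A']) (t ++ ['A']) n (n + 1) 0 0

-- ===== PORT B =====
-- the 'for a, b in zip(start, end)' counter sweep: running L/R counts of both prefixes
def bLoop : List (Char × Char) → Nat → Nat → Nat → Nat → Bool
  | [], _, _, _, _ => true
  | (a, b) :: rest, ls, rs, le, re =>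
    let ls' := if a = 'L' then ls + 1 else ls
    let rs' := if a = 'R' then rs + 1 else rs
    let le' := if b = 'L' then le + 1 else le
    let re' := if b = 'R' then re + 1 else re
    if le' < ls' ∨ rs' < re' then false else bLoop rest ls' rs' le' re'

def caTransform_alt (start : String) (end_ : String) : Bool :=
  let s := start.toList
  let t := end_.toList
  if s.length ≠ t.length then false
  else if s.filter (fun c => c != 'X') ≠ t.filter (fun c => c != 'X') then false
  else bLoop (s.zip t) 0 0 0 0

-- ===== PRECONDITION & SPEC =====
-- the (non-'X' char, position) table of an input string (used only to state D_)
def nxD (a : String) : List (Char × Nat) := a.toList.zipIdx.filter fun p => p.1 ≠ 'X'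

-- the shorter side has m table entries, B is the longer side's table, yet A's sentinel scan
-- misses the surplus: the shorter side's string a ends in a non-'X' character, or the first
-- surplus entry of B is a literal 'A'
def eScape (a : List Char) (m : Nat) (B : List (Char × Nat)) : Prop :=
  m < B.length ∧ (a.getLast?.getD 'X' ≠ 'X' ∨ (B.drop m).headI.1 = 'A')

-- On equal-length inputs whose non-'X' subsequences match pairwise but have different lengths,
-- where the shorter string's last non-'X' sits at the final position or the first surplus
-- non-'X' character is a literal 'A' (colliding with A's sentinel), A returns True; B returns
-- False, the intended answer, since such strings are never transformable into each other.
def D_caTransform (start : String) (end_ : String) : Prop :=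
  let S := nxD start
  let T := nxD end_
  end_.toList.length = start.toList.length ∧
  (eScape start.toList S.length T ∨ eScape end_.toList T.length S) ∧
  ∀ p ∈ S.zip T, p.1.1 = p.2.1 ∧ if p.1.1 = 'L' then p.2.2 ≤ p.1.2 else p.1.1 = 'R' → p.1.2 ≤ p.2.2

instance (start : String) (end_ : String) : Decidable (D_caTransform start end_) := by
  unfold D_caTransform eScape; infer_instance

def Spec_caTransform (start : String) (end_ : String) (out : Bool) : Prop :=
  ¬ D_caTransform start end_ → out = caTransform_alt start end_

instance (start : String) (end_ : String) (out : Bool) : Decidable (Spec_caTransform start end_ out) := by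
  unfold Spec_caTransform; infer_instance

def pvDiffWitness_caTransform : String × String := ("RR", "XR")

def pvDiffWitnessOut_caTransform : Bool × Bool := (true, false)

-- ===== CLAIM (what is proved, stated in full; the proofs are below) =====
def Claim_unchanged_caTransform : Prop := ∀ (start : String) (end_ : String), Dom_caTransform start end_ → Spec_caTransform start end_ (caTransform start end_)

def Claim_changed_caTransform : Prop := Dom_caTransform (pvDiffWitness_caTransform.1) (pvDiffWitness_caTransform.2) ∧ D_caTransform (pvDiffWitness_caTransform.1) (pvDiffWitness_caTransform.2) ∧ caTransform (pvDiffWitness_caTransform.1) (pvDiffWitness_caTransform.2) = pvDiffWitnessOut_caTransform.1 ∧ caTransform_alt (pvDiffWitness_caTransform.1) (pvDiffWitness_caTransform.2) = pvDiffWitnessOut_caTransform.2 ∧ pvDiffWitnessOut_caTransform.1 ≠ pvDiffWitnessOut_caTransform.2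

def Claim_exact_caTransform : Prop := ∀ (start : String) (end_ : String), Dom_caTransform start end_ → D_caTransform start end_ → caTransform start end_ ≠ caTransform_alt start end_

-- ===== LEMMAS AND PROOFS =====

-- proof-side helpers: recursive forms of the table, the pair check and the escape condition
def nx : List Char → Nat → List (Char × Nat)
  | [], _ => []
  | c :: cs, k => if c = 'X' then nx cs (k + 1) else (c, k) :: nx cs (k + 1)

def pairChk (p q : Char × Nat) : Bool :=
  p.1 == q.1 && !(p.1 == 'L' && decide (p.2 < q.2)) && !(p.1 == 'R' && decide (q.2 < p.2))

def chkAll : List (Char × Nat) → List (Char × Nat) → Bool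
  | p :: ps, q :: qs => pairChk p q && chkAll ps qs
  | _, _ => true

def escape (n : Nat) (S T : List (Char × Nat)) : Bool :=
  let sh := if S.length ≤ T.length then S else T
  let lo := if S.length ≤ T.length then T else S
  (decide (sh ≠ []) && (sh.getLast?.map Prod.snd == some (n - 1)))
    || (lo[sh.length]?.map Prod.fst == some 'A')

-- the table of the suffix starting at i
def nxFrom (s : List Char) (i : Nat) : List (Char × Nat) := nx (s.drop i) i

-- reference model of A's loop on the tables: positions replace the pointers
def refAux (n : Nat) : List (Char × Nat) → List (Char × Nat) → Bool
  | (c, p) :: S', (d, q) :: T' =>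
    pairChk (c, p) (d, q) && (if p + 1 < n ∧ q + 1 < n then refAux n S' T' else true)
  | (c, _) :: _, [] => c == 'A'
  | [], (d, _) :: _ => d == 'A'
  | [], [] => true

-- occurrence positions of a letter, and the count of positions below a threshold
def occ (c : Char) : List Char → Nat → List Nat
  | [], _ => []
  | a :: as, k => if a = c then k :: occ c as (k + 1) else occ c as (k + 1)

def cntlt (P : List Nat) (i : Nat) : Nat := (P.filter (fun p => decide (p < i))).length

theorem nx_mem_bounds (s : List Char) (k : Nat) :
    ∀ x ∈ nx s k, k ≤ x.2 ∧ x.2 < k + s.length := by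
  induction s generalizing k with
  | nil => simp [nx]
  | cons c cs ih =>
    intro x hx
    simp only [nx] at hx
    split at hx
    · have := ih (k + 1) x hx
      refine ⟨by omega, ?_⟩
      simp only [List.length_cons]
      omega
    · rcases List.mem_cons.mp hx with h | h
      · subst h
        simp
      · have := ih (k + 1) x h
        refine ⟨by omega, ?_⟩
        simp only [List.length_cons]
        omega

theorem nx_pairwise (s : List Char) (k : Nat) :
    (nx s k).Pairwise (fun a b => a.2 < b.2) := by
  induction s generalizing k with
  | nil => simp [nx]
  | cons c cs ih =>
    simp only [nx]
    split
    · exact ih (k + 1)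
    · exact List.Pairwise.cons
        (fun b hb => by have := (nx_mem_bounds cs (k + 1) b hb).1; omega) (ih (k + 1))

-- unfolding nxFrom one position
theorem nxFrom_of_lt (s : List Char) (i : Nat) (h : i < s.length) :
    nxFrom s i = if s[i] = 'X' then nxFrom s (i + 1) else (s[i], i) :: nxFrom s (i + 1) := by
  unfold nxFrom
  rw [List.drop_eq_getElem_cons h]
  simp [nx]

theorem nxFrom_length_eq (s : List Char) : nxFrom s s.length = [] := by
  simp [nxFrom, nx]

-- skipA on the sentinel-extended string, characterized by the suffix table
theorem skip_spec (s : List Char) (f i : Nat) (hi : i ≤ s.length) (hf : s.length < i + f) :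
    (nxFrom s i = [] → skipA (s ++ ['A']) f i = s.length) ∧
    (∀ c p S', nxFrom s i = (c, p) :: S' →
      skipA (s ++ ['A']) f i = p ∧ (s ++ ['A']).getD p 'A' = c ∧
      nxFrom s (p + 1) = S' ∧ i ≤ p ∧ p < s.length ∧ c ≠ 'X') := by
  induction f generalizing i with
  | zero => omega
  | succ f ih =>
    by_cases h : i < s.length
    · have hsome : (s ++ ['A'])[i]? = some s[i] := by
        rw [List.getElem?_append_left (by simpa using h)]
        simp [h]
      have hget : (s ++ ['A']).getD i 'A' = s[i] := by simp [List.getD, hsome]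
      rw [nxFrom_of_lt s i h]
      by_cases hx : s[i] = 'X'
      · rw [if_pos hx]
        have hrec : skipA (s ++ ['A']) (f + 1) i = skipA (s ++ ['A']) f (i + 1) := by
          simp [skipA, List.getD, hsome, hx]
        have hih := ih (i + 1) (by omega) (by omega)
        refine ⟨fun he => ?_, fun c p S' he => ?_⟩
        · rw [hrec]; exact hih.1 he
        · obtain ⟨h1, h2, h3, h4, h5, h6⟩ := hih.2 c p S' he
          exact ⟨by rw [hrec]; exact h1, h2, h3, by omega, h5, h6⟩
      · rw [if_neg hx]
        have hstop : skipA (s ++ ['A']) (f + 1) i = i := by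
          simp [skipA, List.getD, hsome, hx]
        refine ⟨fun he => by simp at he, fun c p S' he => ?_⟩
        injection he with h1 h2
        injection h1 with hc hp
        subst hc; subst hp
        exact ⟨hstop, hget, h2, le_refl _, h, hx⟩
    · have hie : i = s.length := by omega
      subst hie
      have hsome : (s ++ ['A'])[s.length]? = some 'A' := by
        simp
      refine ⟨fun _ => ?_, fun c p S' heq => ?_⟩
      simp [skipA, List.getD]
      · rw [nxFrom_length_eq] at heq
        exact absurd heq (by simp)

-- invariant: positions strictly increase and are below n
def PInv (n : Nat) (S : List (Char × Nat)) : Prop :=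
  S.Pairwise (fun a b => a.2 < b.2) ∧ ∀ x ∈ S, x.2 < n

theorem pinv_nx (s : List Char) : PInv s.length (nx s 0) :=
  ⟨nx_pairwise s 0, fun x hx => by have := nx_mem_bounds s 0 x hx; omega⟩

-- A's loop equals the model on the suffix tables
theorem loopA_eq (s t : List Char) (ht : t.length = s.length) (f i j : Nat)
    (hf : s.length < i + f) (hi : i ≤ s.length) (hj : j ≤ s.length) :
    loopA (s ++ ['A']) (t ++ ['A']) s.length f i j =
      (if i < s.length ∧ j < s.length then refAux s.length (nxFrom s i) (nxFrom t j) else true) := by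
  induction f generalizing i j with
  | zero => omega
  | succ f ih =>
    by_cases hguard : i < s.length ∧ j < s.length
    · rw [if_pos hguard]
      have hsu : (s ++ ['A']).length = s.length + 1 := by simp
      have htu : (t ++ ['A']).length = s.length + 1 := by simp [ht]
      have hSspec := skip_spec s (s ++ ['A']).length i hi (by simp; omega)
      have hTspec := skip_spec t (t ++ ['A']).length j (by omega) (by simp [ht]; omega)
      rw [ht] at hTspec
      simp only [loopA, if_pos hguard]
      cases hS : nxFrom s i with
      | nil =>
        have hsk := hSspec.1 hS
        cases hT : nxFrom t j with
        | nil =>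
          have htk := hTspec.1 hT
          have hgs : (s ++ ['A']).getD s.length 'A' = 'A' := by
            rw [List.getD_eq_getElem _ _ (by simp)]; simp
          have hgt : (t ++ ['A']).getD s.length 'A' = 'A' := by
            rw [List.getD_eq_getElem _ _ (by simp [ht])]
            simp [← ht]
          rw [hsk, htk, hgs, hgt]
          simp only [ne_eq, not_true_eq_false, if_false]
          have : ¬ (s.length + 1 < s.length ∧ s.length + 1 < s.length) := by omega
          cases f with
          | zero => simp [refAux, loopA]
          | succ f' => simp [refAux, loopA]
        | cons q T' =>
          obtain ⟨d, qq⟩ := q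
          obtain ⟨htk, hgt, hT', hjq, hqn, hdx⟩ := hTspec.2 d qq T' hT
          have hgs : (s ++ ['A']).getD s.length 'A' = 'A' := by
            rw [List.getD_eq_getElem _ _ (by simp)]; simp
          rw [hsk, htk, hgs, hgt]
          by_cases hda : d = 'A'
          · subst hda
            simp only [ne_eq, not_true_eq_false, if_false]
            have hR : ¬ ('A' = 'R' ∧ qq < s.length) := by simp
            have hL : ¬ ('A' = 'L' ∧ s.length < qq) := by simp
            rw [if_neg hR, if_neg hL]
            have : ¬ (s.length + 1 < s.length ∧ qq + 1 < s.length) := by omega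
            cases f with
            | zero => simp [refAux, loopA]
            | succ f' => simp [refAux, loopA]
          · have : 'A' ≠ d := fun hc => hda hc.symm
            rw [if_pos this]
            simp [refAux, hda]
      | cons pr S' =>
        obtain ⟨c, pp⟩ := pr
        obtain ⟨hsk, hgs, hS', hip, hpn, hcx⟩ := hSspec.2 c pp S' hS
        cases hT : nxFrom t j with
        | nil =>
          have htk := hTspec.1 hT
          have hgt : (t ++ ['A']).getD s.length 'A' = 'A' := by
            rw [List.getD_eq_getElem _ _ (by simp [ht])]
            simp [← ht]
          rw [hsk, htk, hgs, hgt]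
          by_cases hca : c = 'A'
          · subst hca
            simp only [ne_eq, not_true_eq_false, if_false]
            have hR : ¬ ('A' = 'R' ∧ s.length < pp) := by simp
            have hL : ¬ ('A' = 'L' ∧ pp < s.length) := by simp
            rw [if_neg hR, if_neg hL]
            have : ¬ (pp + 1 < s.length ∧ s.length + 1 < s.length) := by omega
            cases f with
            | zero => simp [refAux, loopA]
            | succ f' => simp [refAux, loopA]
          · rw [if_pos hca]
            simp [refAux, hca]
        | cons q T' =>
          obtain ⟨d, qq⟩ := q
          obtain ⟨htk, hgt, hT', hjq, hqn, hdx⟩ := hTspec.2 d qq T' hT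
          rw [hsk, htk, hgs, hgt]
          by_cases hcd : c = d
          · subst hcd
            simp only [ne_eq, not_true_eq_false, if_false]
            by_cases hR : c = 'R' ∧ qq < pp
            · rw [if_pos hR]
              simp [refAux, pairChk, hR.1, hR.2]
            · rw [if_neg hR]
              by_cases hL : c = 'L' ∧ pp < qq
              · rw [if_pos hL]
                have : ¬ (c = 'R') := by
                  intro hc; subst hc; exact absurd hL.1 (by decide)
                simp [refAux, pairChk, hL.1, hL.2]
              · rw [if_neg hL]
                have hrec := ih (pp + 1) (qq + 1) (by omega) (by omega) (by omega)
                rw [hrec, hS', hT']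
                simp only [refAux]
                have hpc : pairChk (c, pp) (c, qq) = true := by
                  simp only [pairChk, beq_self_eq_true, Bool.true_and]
                  by_cases hcl : c = 'L'
                  · subst hcl
                    have : ¬ pp < qq := fun hc => hL ⟨rfl, hc⟩
                    simp [this]
                  · by_cases hcr : c = 'R'
                    · subst hcr
                      have : ¬ qq < pp := fun hc => hR ⟨rfl, hc⟩
                      simp [this]
                    · simp [hcl, hcr]
                rw [hpc]
                simp
          · rw [if_pos hcd]
            have : (c == d) = false := by simp [hcd]
            simp [refAux, pairChk, this]
    · rw [if_neg hguard]
      simp [loopA, hguard]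

-- the model in closed form, under the position invariant
theorem refAux_eq (n : Nat) (S T : List (Char × Nat)) (hS : PInv n S) (hT : PInv n T) :
    refAux n S T = (chkAll S T && (S.length == T.length || escape n S T)) := by
  induction S generalizing T with
  | nil =>
    cases T with
    | nil => simp [refAux, chkAll]
    | cons q T' =>
      obtain ⟨d, qq⟩ := q
      simp [refAux, chkAll, escape]
  | cons pr S' ih =>
    obtain ⟨c, pp⟩ := pr
    cases T with
    | nil =>
      simp only [refAux, chkAll]
      have : ¬ ((c, pp) :: S').length ≤ ([] : List (Char × Nat)).length := by simp
      simp [escape]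
    | cons q T' =>
      obtain ⟨d, qq⟩ := q
      have hS' : PInv n S' := ⟨hS.1.of_cons, fun x hx => hS.2 x (List.mem_cons_of_mem _ hx)⟩
      have hT' : PInv n T' := ⟨hT.1.of_cons, fun x hx => hT.2 x (List.mem_cons_of_mem _ hx)⟩
      simp only [refAux, chkAll]
      by_cases hpc : pairChk (c, pp) (d, qq) = true
      · rw [hpc]
        simp only [Bool.true_and]
        by_cases hguard : pp + 1 < n ∧ qq + 1 < n
        · rw [if_pos hguard, ih T' hS' hT']
          congr 1
          by_cases hlen : S'.length = T'.length
          · have : ((c, pp) :: S').length = ((d, qq) :: T').length := by simp [hlen]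
            simp [hlen, this]
          · have hlen2 : ((c, pp) :: S').length ≠ ((d, qq) :: T').length := by simp [hlen]
            have he1 : (S'.length == T'.length) = false := by simp [hlen]
            have he2 : (((c, pp) :: S').length == ((d, qq) :: T').length) = false := by simp [hlen]
            rw [he1, he2, Bool.false_or, Bool.false_or]
            -- escape is preserved one step down
            by_cases hord : S'.length ≤ T'.length
            · have hord2 : ((c, pp) :: S').length ≤ ((d, qq) :: T').length := by simp; omega
              simp only [escape, if_pos hord, if_pos hord2]
              cases hS'e : S' with
              | nil =>
                have hT'ne : T' ≠ [] := by
                  intro hc; rw [hS'e, hc] at hlen; exact hlen rfl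
                obtain ⟨q2, T''⟩ := List.exists_cons_of_ne_nil hT'ne
                subst hS'e
                have hppn : pp ≠ n - 1 := by omega
                simp only [List.getLast?_singleton]
                simp [hppn]
              | cons p2 S'' =>
                rw [← hS'e]
                have hne1 : S' ≠ [] := by rw [hS'e]; simp
                have hne2 : (c, pp) :: S' ≠ [] := by simp
                have hlast : ((c, pp) :: S').getLast? = S'.getLast? := by
                  rw [hS'e]; simp [List.getLast?_cons_cons]
                have hidx : ((d, qq) :: T')[((c, pp) :: S').length]? = T'[S'.length]? := by
                  simp
                rw [hlast, hidx]
                simp [hne1, hne2]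
            · have hord2 : ¬ ((c, pp) :: S').length ≤ ((d, qq) :: T').length := by simp; omega
              simp only [escape, if_neg hord, if_neg hord2]
              cases hT'e : T' with
              | nil =>
                have hS'ne : S' ≠ [] := by
                  intro hc; rw [hT'e, hc] at hlen; exact hlen rfl
                subst hT'e
                have hqqn : qq ≠ n - 1 := by omega
                simp only [List.getLast?_singleton]
                simp [hqqn]
              | cons q2 T'' =>
                rw [← hT'e]
                have hne1 : T' ≠ [] := by rw [hT'e]; simp
                have hne2 : (d, qq) :: T' ≠ [] := by simp
                have hlast : ((d, qq) :: T').getLast? = T'.getLast? := by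
                  rw [hT'e]; simp [List.getLast?_cons_cons]
                have hidx : ((c, pp) :: S')[((d, qq) :: T').length]? = S'[T'.length]? := by
                  simp
                rw [hlast, hidx]
                simp [hne1, hne2]
        · rw [if_neg hguard]
          -- the pointer ran off the end: the side that ended must have been exhausted
          have hppn : pp < n := hS.2 (c, pp) (List.mem_cons_self)
          have hqqn : qq < n := hT.2 (d, qq) (List.mem_cons_self)
          by_cases hS'e : S' = []
          · by_cases hT'e : T' = []
            · subst hS'e; subst hT'e
              simp [chkAll]
            · -- S' = [], T' ≠ [] : then qq+1 < n, so pp = n-1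
              have hqlt : qq + 1 < n := by
                have hmem : T'.head hT'e ∈ T' := List.head_mem hT'e
                have h1 : qq < (T'.head hT'e).2 := by
                  have := List.rel_of_pairwise_cons hT.1 hmem
                  exact this
                have h2 : (T'.head hT'e).2 < n := hT'.2 _ hmem
                omega
              have hpp : pp + 1 = n := by omega
              subst hS'e
              simp only [chkAll]
              have hord : ((c, pp) :: ([] : List (Char × Nat))).length ≤ ((d, qq) :: T').length := by
                simp only [List.length_cons, List.length_nil]
                omega
              have hescape : escape n ((c, pp) :: []) ((d, qq) :: T') = true := by
                simp only [escape, if_pos hord]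
                have : pp = n - 1 := by omega
                simp [this]
              rw [hescape]
              simp
          · -- S' ≠ [] : then pp+1 < n, so qq = n-1 and T' = []
            have hplt : pp + 1 < n := by
              have hmem : S'.head hS'e ∈ S' := List.head_mem hS'e
              have h1 : pp < (S'.head hS'e).2 := List.rel_of_pairwise_cons hS.1 hmem
              have h2 : (S'.head hS'e).2 < n := hS'.2 _ hmem
              omega
            have hqq : qq + 1 = n := by omega
            have hT'e : T' = [] := by
              by_contra hT'ne
              have hmem : T'.head hT'ne ∈ T' := List.head_mem hT'ne
              have h1 : qq < (T'.head hT'ne).2 := List.rel_of_pairwise_cons hT.1 hmem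
              have h2 : (T'.head hT'ne).2 < n := hT'.2 _ hmem
              omega
            subst hT'e
            simp only [chkAll]
            have hord : ¬ ((c, pp) :: S').length ≤ ((d, qq) :: ([] : List (Char × Nat))).length := by
              have := List.length_pos_of_ne_nil hS'e
              simp only [List.length_cons, List.length_nil]
              omega
            have hescape : escape n ((c, pp) :: S') ((d, qq) :: []) = true := by
              simp only [escape, if_neg hord]
              have : qq = n - 1 := by omega
              simp [this]
            rw [hescape]
            simp
      · have hpc' : pairChk (c, pp) (d, qq) = false := by
          cases h : pairChk (c, pp) (d, qq)
          · rfl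
          · exact absurd h hpc
        rw [hpc']
        simp

-- A's value on equal-length strings, in closed form
theorem A_char (start end_ : String) (ht : end_.toList.length = start.toList.length) :
    caTransform start end_ =
      (chkAll (nx start.toList 0) (nx end_.toList 0) &&
        ((nx start.toList 0).length == (nx end_.toList 0).length ||
          escape start.toList.length (nx start.toList 0) (nx end_.toList 0))) := by
  have hA : caTransform start end_ =
      loopA (start.toList ++ ['A']) (end_.toList ++ ['A']) start.toList.length
        (start.toList.length + 1) 0 0 :=
    if_neg (by omega)
  rw [hA, loopA_eq start.toList end_.toList ht (start.toList.length + 1) 0 0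
        (by omega) (by omega) (by omega)]
  by_cases hn : 0 < start.toList.length
  · rw [if_pos ⟨hn, hn⟩]
    have h0 : nxFrom start.toList 0 = nx start.toList 0 := by simp [nxFrom]
    have h1 : nxFrom end_.toList 0 = nx end_.toList 0 := by simp [nxFrom]
    rw [h0, h1, refAux_eq start.toList.length (nx start.toList 0) (nx end_.toList 0)
          (pinv_nx start.toList) (by rw [← ht]; exact pinv_nx end_.toList)]
  · rw [if_neg (by omega)]
    have hs : start.toList = [] := List.eq_nil_of_length_eq_zero (by omega)
    have htl : end_.toList = [] := List.eq_nil_of_length_eq_zero (by omega)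
    rw [hs, htl]
    simp [nx, chkAll]

-- ============ B-side lemmas ============

-- the X-erased string is the char column of the table
theorem filter_eq_map_fst (s : List Char) (k : Nat) :
    s.filter (fun c => c != 'X') = (nx s k).map Prod.fst := by
  induction s generalizing k with
  | nil => simp [nx]
  | cons c cs ih =>
    by_cases hx : c = 'X' <;> simp [nx, hx, ih (k + 1)]

-- unequal char columns of equal length force a failing pair
theorem chkAll_false_of_fst_ne (S T : List (Char × Nat)) (hlen : S.length = T.length)
    (hne : S.map Prod.fst ≠ T.map Prod.fst) : chkAll S T = false := by
  induction S generalizing T with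
  | nil =>
    cases T with
    | nil => simp at hne
    | cons q T' => simp at hlen
  | cons p S' ih =>
    obtain ⟨c, pp⟩ := p
    cases T with
    | nil => simp at hlen
    | cons q T' =>
      obtain ⟨d, qq⟩ := q
      by_cases hcd : c = d
      · subst hcd
        have hne' : S'.map Prod.fst ≠ T'.map Prod.fst := by
          intro h; apply hne; simp [h]
        have := ih T' (by simpa using hlen) hne'
        simp [chkAll, this]
      · have : (c == d) = false := by simp [hcd]
        simp [chkAll, pairChk, this]

-- chkAll as a conjunction over matched pairs
theorem chkAll_eq_all (S T : List (Char × Nat)) :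
    chkAll S T = (S.zip T).all (fun x => pairChk x.1 x.2) := by
  induction S generalizing T with
  | nil => cases T <;> simp [chkAll]
  | cons p S' ih =>
    cases T with
    | nil => simp [chkAll]
    | cons q T' => simp [chkAll, ih T']

-- matched pairs carry equal chars when the columns agree
theorem zip_fst_eq (S T : List (Char × Nat)) (hfst : S.map Prod.fst = T.map Prod.fst) :
    ∀ x ∈ S.zip T, x.1.1 = x.2.1 := by
  induction S generalizing T with
  | nil => simp
  | cons p S' ih =>
    cases T with
    | nil => simp at hfst
    | cons q T' =>
      simp only [List.map_cons, List.cons.injEq] at hfst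
      intro x hx
      rcases List.mem_cons.mp (by simpa [List.zip_cons_cons] using hx) with h | h
      · subst h; exact hfst.1
      · exact ih T' hfst.2 x h

-- pairChk on an equal-char pair, decomposed
theorem pairChk_decomp (p q : Char × Nat) (h : p.1 = q.1) :
    (pairChk p q = true) ↔ ((p.1 = 'L' → q.2 ≤ p.2) ∧ (p.1 = 'R' → p.2 ≤ q.2)) := by
  obtain ⟨c, pp⟩ := p
  obtain ⟨d, qq⟩ := q
  simp only at h
  subst h
  by_cases hcl : c = 'L'
  · subst hcl
    simp [pairChk, not_lt]
  · by_cases hcr : c = 'R'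
    · subst hcr
      simp [pairChk, not_lt]
    · simp [pairChk, hcl, hcr]

-- a membership condition on same-char pairs, moved through the filter to a zip of filters
theorem filter_zip_eq (S T : List (Char × Nat)) (hfst : S.map Prod.fst = T.map Prod.fst)
    (c : Char) :
    (S.zip T).filter (fun x => x.1.1 == c) =
      (S.filter (fun p => p.1 == c)).zip (T.filter (fun p => p.1 == c)) := by
  induction S generalizing T with
  | nil =>
    cases T <;> simp
  | cons p S' ih =>
    cases T with
    | nil => simp at hfst
    | cons q T' =>
      simp only [List.map_cons, List.cons.injEq] at hfst
      rw [List.zip_cons_cons]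
      by_cases hc : p.1 = c
      · have hq : q.1 = c := by rw [← hfst.1, hc]
        simp [hc, hq, ih T' hfst.2]
      · have hq : ¬ q.1 = c := by rw [← hfst.1]; exact hc
        simp [hc, hq, ih T' hfst.2]

-- forall-over-zip in index form
theorem zip_forall_iff_idx {α β : Type} (A : List α) (B : List β) (r : α → β → Prop) :
    (∀ x ∈ A.zip B, r x.1 x.2) ↔
      (∀ (k : Nat) (a : α) (b : β), A[k]? = some a → B[k]? = some b → r a b) := by
  induction A generalizing B with
  | nil => simp
  | cons a A' ih =>
    cases B with
    | nil => simp
    | cons b B' =>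
      rw [List.zip_cons_cons]
      constructor
      · intro h k x y hx hy
        cases k with
        | zero =>
          simp only [List.getElem?_cons_zero, Option.some.injEq] at hx hy
          subst hx; subst hy
          exact h (a, b) (List.mem_cons_self)
        | succ k =>
          simp only [List.getElem?_cons_succ] at hx hy
          exact (ih B').mp (fun z hz => h z (List.mem_cons_of_mem _ hz)) k x y hx hy
      · intro h x hx
        rcases List.mem_cons.mp hx with h0 | h0
        · subst h0
          exact h 0 a b (by simp) (by simp)
        · exact (ih B').mpr (fun k x y hx hy => h (k + 1) x y (by simpa) (by simpa)) x h0

-- index form through map snd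
theorem idx_map_snd {α : Type} (A B : List (α × Nat)) (r : Nat → Nat → Prop) :
    (∀ (k : Nat) (p q : α × Nat), A[k]? = some p → B[k]? = some q → r p.2 q.2) ↔
      (∀ (k : Nat) (a b : Nat), (A.map Prod.snd)[k]? = some a → (B.map Prod.snd)[k]? = some b →
        r a b) := by
  constructor
  · intro h k a b ha hb
    rw [List.getElem?_map] at ha hb
    rcases Option.map_eq_some_iff.mp ha with ⟨p, hp, hp2⟩
    rcases Option.map_eq_some_iff.mp hb with ⟨q, hq, hq2⟩
    subst hp2; subst hq2
    exact h k p q hp hq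
  · intro h k p q hp hq
    exact h k p.2 q.2 (by rw [List.getElem?_map, hp]; rfl) (by rw [List.getElem?_map, hq]; rfl)

-- occurrence lists: bounds and sortedness
theorem occ_mem_bounds (c : Char) (s : List Char) (k : Nat) :
    ∀ x ∈ occ c s k, k ≤ x := by
  induction s generalizing k with
  | nil => simp [occ]
  | cons a as ih =>
    intro x hx
    simp only [occ] at hx
    split at hx
    · rcases List.mem_cons.mp hx with h | h
      · omega
      · have := ih (k + 1) x h; omega
    · have := ih (k + 1) x hx; omega

theorem occ_pairwise (c : Char) (s : List Char) (k : Nat) :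
    (occ c s k).Pairwise (· < ·) := by
  induction s generalizing k with
  | nil => simp [occ]
  | cons a as ih =>
    simp only [occ]
    split
    · exact List.Pairwise.cons (fun b hb => by have := occ_mem_bounds c as (k + 1) b hb; omega)
        (ih (k + 1))
    · exact ih (k + 1)

-- the snd column of the c-filtered table is the occurrence list
theorem map_snd_filter_nx (c : Char) (hc : c ≠ 'X') (s : List Char) (k : Nat) :
    ((nx s k).filter (fun p => p.1 == c)).map Prod.snd = occ c s k := by
  induction s generalizing k with
  | nil => simp [nx, occ]
  | cons a as ih =>
    simp only [nx, occ]
    by_cases hx : a = 'X'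
    · have hac : ¬ a = c := by rw [hx]; exact fun h => hc h.symm
      rw [if_pos hx, if_neg hac]
      exact ih (k + 1)
    · rw [if_neg hx]
      by_cases hac : a = c
      · rw [if_pos hac, List.filter_cons]
        simp only [hac, beq_self_eq_true, if_pos]
        simp [ih (k + 1)]
      · rw [if_neg hac, List.filter_cons]
        have : (a == c) = false := by simp [hac]
        simp only [this, Bool.false_eq_true, if_neg, ite_false]
        exact ih (k + 1)

-- counting below a threshold in a sorted list, via the k-th element
theorem cntlt_iff (P : List Nat) (hP : P.Pairwise (· < ·)) (k p : Nat)
    (h : P[k]? = some p) (i : Nat) : p < i ↔ k < cntlt P i := by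
  induction P generalizing k with
  | nil => simp at h
  | cons a P' ih =>
    have hP' : P'.Pairwise (· < ·) := hP.of_cons
    by_cases hai : a < i
    · have hc : cntlt (a :: P') i = 1 + cntlt P' i := by
        simp [cntlt, hai, Nat.add_comm]
      cases k with
      | zero =>
        simp only [List.getElem?_cons_zero, Option.some.injEq] at h
        subst h
        rw [hc]
        constructor <;> intro <;> omega
      | succ k =>
        simp only [List.getElem?_cons_succ] at h
        rw [hc, ih hP' k h]
        omega
    · have hnil : P'.filter (fun p => decide (p < i)) = [] := by
        rw [List.filter_eq_nil_iff]
        intro b hb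
        have : a < b := List.rel_of_pairwise_cons hP hb
        simp only [decide_eq_true_eq]
        omega
      have hc : cntlt (a :: P') i = 0 := by
        simp [cntlt, hai, hnil]
      cases k with
      | zero =>
        simp only [List.getElem?_cons_zero, Option.some.injEq] at h
        subst h
        rw [hc]
        constructor <;> intro <;> omega
      | succ k =>
        simp only [List.getElem?_cons_succ] at h
        have hmem : p ∈ P' := List.mem_of_getElem? h
        have : a < p := List.rel_of_pairwise_cons hP hmem
        rw [hc]
        constructor <;> intro <;> omega

theorem cntlt_le_length (P : List Nat) (i : Nat) : cntlt P i ≤ P.length :=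
  List.length_filter_le _ _

-- pointwise domination of sorted equal-length lists ↔ prefix-count domination
theorem pointwise_iff_counts (P Q : List Nat) (hP : P.Pairwise (· < ·))
    (hQ : Q.Pairwise (· < ·)) (hlen : P.length = Q.length) :
    (∀ (k p q : Nat), P[k]? = some p → Q[k]? = some q → q ≤ p) ↔
      (∀ i, cntlt P i ≤ cntlt Q i) := by
  constructor
  · intro h i
    by_cases hm : cntlt P i = 0
    · omega
    · have hk : cntlt P i - 1 < cntlt P i := by omega
      have hkP : cntlt P i - 1 < P.length := by
        have := cntlt_le_length P i; omega
      have hkQ : cntlt P i - 1 < Q.length := by omega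
      have hp : P[cntlt P i - 1]? = some P[cntlt P i - 1] := List.getElem?_eq_getElem hkP
      have hq : Q[cntlt P i - 1]? = some Q[cntlt P i - 1] := List.getElem?_eq_getElem hkQ
      have hpi : P[cntlt P i - 1] < i := (cntlt_iff P hP _ _ hp i).mpr hk
      have hqp : Q[cntlt P i - 1] ≤ P[cntlt P i - 1] := h _ _ _ hp hq
      have : Q[cntlt P i - 1] < i := by omega
      have := (cntlt_iff Q hQ _ _ hq i).mp this
      omega
  · intro h k p q hp hq
    have h1 : k < cntlt P (p + 1) := (cntlt_iff P hP k p hp (p + 1)).mp (by omega)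
    have h2 : k < cntlt Q (p + 1) := by have := h (p + 1); omega
    have := (cntlt_iff Q hQ k q hq (p + 1)).mpr h2
    omega

-- counting occurrences below a threshold = counting the letter in the prefix
theorem cntlt_occ_count (c : Char) (s : List Char) (k i : Nat) :
    cntlt (occ c s k) (k + i) = (s.take i).count c := by
  induction s generalizing k i with
  | nil => simp [occ, cntlt]
  | cons a as ih =>
    cases i with
    | zero =>
      simp only [List.take_zero, List.count_nil, cntlt]
      rw [List.length_eq_zero_iff, List.filter_eq_nil_iff]
      intro b hb
      have := occ_mem_bounds c (a :: as) k b hb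
      simp only [decide_eq_true_eq]
      omega
    | succ i =>
      by_cases hac : a = c
      · have hklt : k < k + (i + 1) := by omega
        have : cntlt (occ c (a :: as) k) (k + (i + 1)) =
            1 + cntlt (occ c as (k + 1)) ((k + 1) + i) := by
          simp only [occ, if_pos hac, cntlt, List.filter_cons]
          have : (k + 1) + i = k + (i + 1) := by omega
          simp [hklt, this, Nat.add_comm]
        rw [this, ih (k + 1) i]
        simp [List.count_cons, hac]
        omega
      · have : cntlt (occ c (a :: as) k) (k + (i + 1)) =
            cntlt (occ c as (k + 1)) ((k + 1) + i) := by
          simp only [occ, if_neg hac, cntlt]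
          have : (k + 1) + i = k + (i + 1) := by omega
          rw [this]
        rw [this, ih (k + 1) i]
        have : (a == c) = false := by simp [hac]
        simp [List.count_cons, this]

-- B's counter sweep, characterized by prefix counts
theorem count_cons_char (x c : Char) (l : List Char) :
    (x :: l).count c = l.count c + (if x = c then 1 else 0) := by
  by_cases h : x = c <;> simp [List.count_cons, h]

theorem bLoop_iff (l : List (Char × Char)) (ls rs le re : Nat) (h1 : ls ≤ le) (h2 : re ≤ rs) :
    bLoop l ls rs le re = true ↔
      ∀ i : Nat,
        ls + ((l.take i).map Prod.fst).count 'L' ≤ le + ((l.take i).map Prod.snd).count 'L' ∧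
        re + ((l.take i).map Prod.snd).count 'R' ≤ rs + ((l.take i).map Prod.fst).count 'R' := by
  induction l generalizing ls rs le re with
  | nil =>
    simp only [bLoop, List.take_nil, List.map_nil, List.count_nil]
    constructor
    · intro _ i; exact ⟨by omega, by omega⟩
    · intro _; trivial
  | cons ab rest ih =>
    obtain ⟨a, b⟩ := ab
    simp only [bLoop]
    by_cases hfail : (if b = 'L' then le + 1 else le) < (if a = 'L' then ls + 1 else ls) ∨
        (if a = 'R' then rs + 1 else rs) < (if b = 'R' then re + 1 else re)
    · rw [if_pos hfail]
      apply iff_of_false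
      · simp
      · intro h
        have hh := h (0 + 1)
        simp only [List.take_succ_cons, List.take_zero, List.map_cons, List.map_nil,
          count_cons_char, List.count_nil] at hh
        split_ifs at hfail hh <;> omega
    · rw [if_neg hfail]
      rw [ih _ _ _ _ (by split_ifs at hfail ⊢ <;> omega) (by split_ifs at hfail ⊢ <;> omega)]
      constructor
      · intro h i
        cases i with
        | zero =>
          simp only [List.take_zero, List.map_nil, List.count_nil]
          omega
        | succ i =>
          have hh := h i
          simp only [List.take_succ_cons, List.map_cons, count_cons_char]
          split_ifs at hfail hh ⊢ <;> omega
      · intro h i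
        have hh := h (i + 1)
        simp only [List.take_succ_cons, List.map_cons, count_cons_char] at hh
        split_ifs at hfail hh ⊢ <;> omega

-- column lengths agree when the char columns agree
theorem filter_length_eq (S T : List (Char × Nat)) (hfst : S.map Prod.fst = T.map Prod.fst)
    (c : Char) :
    (S.filter (fun p => p.1 == c)).length = (T.filter (fun p => p.1 == c)).length := by
  induction S generalizing T with
  | nil => cases T with
    | nil => rfl
    | cons q T' => simp at hfst
  | cons p S' ih =>
    cases T with
    | nil => simp at hfst
    | cons q T' =>
      simp only [List.map_cons, List.cons.injEq] at hfst
      by_cases hc : p.1 = c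
      · have hq : q.1 = c := by rw [← hfst.1, hc]
        simp [hc, hq, ih T' hfst.2]
      · have hq : ¬ q.1 = c := by rw [← hfst.1]; exact hc
        simp [hc, hq, ih T' hfst.2]

-- the heart of the equivalence: on equal char columns, the positional table check of A
-- equals B's counting sweep
theorem chkAll_eq_bLoop (s t : List Char) (hlen : t.length = s.length)
    (hfst : (nx s 0).map Prod.fst = (nx t 0).map Prod.fst) :
    chkAll (nx s 0) (nx t 0) = bLoop (s.zip t) 0 0 0 0 := by
  -- occurrence-list lengths agree
  have hocclen : ∀ c, c ≠ 'X' → (occ c s 0).length = (occ c t 0).length := by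
    intro c hc
    rw [← map_snd_filter_nx c hc s 0, ← map_snd_filter_nx c hc t 0,
      List.length_map, List.length_map]
    exact filter_length_eq _ _ hfst c
  have hcnt : ∀ (c : Char) (u : List Char) (i : Nat),
      cntlt (occ c u 0) i = (u.take i).count c := by
    intro c u i
    simpa using cntlt_occ_count c u 0 i
  -- chkAll side in Prop form
  have hA : chkAll (nx s 0) (nx t 0) = true ↔
      ((∀ x ∈ (nx s 0).zip (nx t 0), x.1.1 = 'L' → x.2.2 ≤ x.1.2) ∧
       (∀ x ∈ (nx s 0).zip (nx t 0), x.1.1 = 'R' → x.1.2 ≤ x.2.2)) := by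
    rw [chkAll_eq_all, List.all_eq_true]
    constructor
    · intro h
      constructor
      · intro x hx hL
        exact (((pairChk_decomp x.1 x.2 (zip_fst_eq _ _ hfst x hx)).mp (h x hx)).1 hL)
      · intro x hx hR
        exact (((pairChk_decomp x.1 x.2 (zip_fst_eq _ _ hfst x hx)).mp (h x hx)).2 hR)
    · intro h x hx
      exact (pairChk_decomp x.1 x.2 (zip_fst_eq _ _ hfst x hx)).mpr
        ⟨fun hL => h.1 x hx hL, fun hR => h.2 x hx hR⟩
  -- the L condition as prefix counts
  have hmemIffL :
      (∀ x ∈ (nx s 0).zip (nx t 0), x.1.1 = 'L' → x.2.2 ≤ x.1.2) ↔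
        (∀ i, (s.take i).count 'L' ≤ (t.take i).count 'L') := by
    have step1 : (∀ x ∈ (nx s 0).zip (nx t 0), x.1.1 = 'L' → x.2.2 ≤ x.1.2) ↔
        (∀ x ∈ ((nx s 0).filter (fun p => p.1 == 'L')).zip
            ((nx t 0).filter (fun p => p.1 == 'L')), x.2.2 ≤ x.1.2) := by
      rw [← filter_zip_eq _ _ hfst 'L']
      constructor
      · intro h x hx
        rcases List.mem_filter.mp hx with ⟨hmem, hl⟩
        exact h x hmem (by simpa using hl)
      · intro h x hx hl
        exact h x (List.mem_filter.mpr ⟨hx, by simpa using hl⟩)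
    have step2 := zip_forall_iff_idx ((nx s 0).filter (fun p => p.1 == 'L'))
      ((nx t 0).filter (fun p => p.1 == 'L')) (fun p q => q.2 ≤ p.2)
    have step3 := idx_map_snd ((nx s 0).filter (fun p => p.1 == 'L'))
      ((nx t 0).filter (fun p => p.1 == 'L')) (fun a b => b ≤ a)
    have step4 : (∀ (k a b : Nat),
        (((nx s 0).filter (fun p => p.1 == 'L')).map Prod.snd)[k]? = some a →
        (((nx t 0).filter (fun p => p.1 == 'L')).map Prod.snd)[k]? = some b → b ≤ a) ↔
        (∀ i, (s.take i).count 'L' ≤ (t.take i).count 'L') := by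
      rw [map_snd_filter_nx 'L' (by decide) s 0, map_snd_filter_nx 'L' (by decide) t 0]
      refine Iff.trans (pointwise_iff_counts _ _ (occ_pairwise 'L' s 0) (occ_pairwise 'L' t 0)
        (hocclen 'L' (by decide))) ?_
      exact forall_congr' fun i => by rw [hcnt 'L' s i, hcnt 'L' t i]
    exact step1.trans (step2.trans (step3.trans step4))
  -- the R condition as prefix counts
  have hmemIffR :
      (∀ x ∈ (nx s 0).zip (nx t 0), x.1.1 = 'R' → x.1.2 ≤ x.2.2) ↔
        (∀ i, (t.take i).count 'R' ≤ (s.take i).count 'R') := by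
    have step1 : (∀ x ∈ (nx s 0).zip (nx t 0), x.1.1 = 'R' → x.1.2 ≤ x.2.2) ↔
        (∀ x ∈ ((nx s 0).filter (fun p => p.1 == 'R')).zip
            ((nx t 0).filter (fun p => p.1 == 'R')), x.1.2 ≤ x.2.2) := by
      rw [← filter_zip_eq _ _ hfst 'R']
      constructor
      · intro h x hx
        rcases List.mem_filter.mp hx with ⟨hmem, hl⟩
        exact h x hmem (by simpa using hl)
      · intro h x hx hl
        exact h x (List.mem_filter.mpr ⟨hx, by simpa using hl⟩)
    have step2 := zip_forall_iff_idx ((nx s 0).filter (fun p => p.1 == 'R'))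
      ((nx t 0).filter (fun p => p.1 == 'R')) (fun p q => p.2 ≤ q.2)
    have step3 := idx_map_snd ((nx s 0).filter (fun p => p.1 == 'R'))
      ((nx t 0).filter (fun p => p.1 == 'R')) (fun a b => a ≤ b)
    have step4 : (∀ (k a b : Nat),
        (((nx s 0).filter (fun p => p.1 == 'R')).map Prod.snd)[k]? = some a →
        (((nx t 0).filter (fun p => p.1 == 'R')).map Prod.snd)[k]? = some b → a ≤ b) ↔
        (∀ i, (t.take i).count 'R' ≤ (s.take i).count 'R') := by
      rw [map_snd_filter_nx 'R' (by decide) s 0, map_snd_filter_nx 'R' (by decide) t 0]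
      have hpt := pointwise_iff_counts (occ 'R' t 0) (occ 'R' s 0)
        (occ_pairwise 'R' t 0) (occ_pairwise 'R' s 0) (hocclen 'R' (by decide)).symm
      constructor
      · intro h
        refine (forall_congr' fun i => ?_).mp
          (hpt.mp (fun k p q hp hq => h k q p hq hp))
        rw [hcnt 'R' t i, hcnt 'R' s i]
      · intro h k a b ha hb
        refine hpt.mpr ?_ k b a hb ha
        intro i
        rw [hcnt 'R' t i, hcnt 'R' s i]
        exact h i
    exact step1.trans (step2.trans (step3.trans step4))
  -- bLoop side in prefix-count form
  have hmapfst : (s.zip t).map Prod.fst = s := List.map_fst_zip (by omega)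
  have hmapsnd : (s.zip t).map Prod.snd = t := List.map_snd_zip (by omega)
  have hB : bLoop (s.zip t) 0 0 0 0 = true ↔
      ∀ i : Nat, (s.take i).count 'L' ≤ (t.take i).count 'L' ∧
        (t.take i).count 'R' ≤ (s.take i).count 'R' := by
    rw [bLoop_iff _ 0 0 0 0 (by omega) (by omega)]
    refine forall_congr' fun i => ?_
    rw [List.map_take, List.map_take, hmapfst, hmapsnd]
    constructor <;> intro h <;> omega
  -- assemble
  cases hA' : chkAll (nx s 0) (nx t 0) with
  | true =>
    symm
    rw [hB]
    obtain ⟨hL, hR⟩ := hA.mp hA'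
    exact fun i => ⟨hmemIffL.mp hL i, hmemIffR.mp hR i⟩
  | false =>
    by_contra hBB
    have hBtrue : bLoop (s.zip t) 0 0 0 0 = true := by
      cases h : bLoop (s.zip t) 0 0 0 0
      · exact absurd h.symm hBB
      · rfl
    have hcnt2 := hB.mp hBtrue
    have : chkAll (nx s 0) (nx t 0) = true := by
      rw [hA]
      exact ⟨hmemIffL.mpr fun i => (hcnt2 i).1, hmemIffR.mpr fun i => (hcnt2 i).2⟩
    rw [hA'] at this
    exact absurd this (by simp)

-- bridging the compact D_ statement to the proof-side helpers
theorem zipIdx_filter_eq_nx (s : List Char) (k : Nat) :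
    (s.zipIdx k).filter (fun p => p.1 ≠ 'X') = nx s k := by
  induction s generalizing k with
  | nil => simp [nx]
  | cons c cs ih =>
    simp only [ne_eq, decide_not] at ih ⊢
    by_cases hx : c = 'X' <;> simp [List.zipIdx_cons, nx, hx, ih]

theorem nxD_eq (a : String) : nxD a = nx a.toList 0 := zipIdx_filter_eq_nx a.toList 0

theorem pairChk_iff (c : Char) (i : Nat) (d : Char) (j : Nat) :
    pairChk (c, i) (d, j) = true ↔
      (c = d ∧ if c = 'L' then j ≤ i else c = 'R' → i ≤ j) := by
  by_cases hcd : c = d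
  · subst hcd
    by_cases hcl : c = 'L'
    · subst hcl
      simp [pairChk, not_lt]
    · by_cases hcr : c = 'R'
      · subst hcr
        simp [pairChk, not_lt]
      · simp [pairChk, hcl, hcr]
  · simp [pairChk, hcd]

theorem forall_zip_iff_chkAll (S T : List (Char × Nat)) :
    (∀ p ∈ S.zip T, p.1.1 = p.2.1 ∧
        if p.1.1 = 'L' then p.2.2 ≤ p.1.2 else p.1.1 = 'R' → p.1.2 ≤ p.2.2) ↔
      chkAll S T = true := by
  induction S generalizing T with
  | nil => cases T <;> simp [chkAll]
  | cons p S' ih =>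
    obtain ⟨c, pp⟩ := p
    cases T with
    | nil => simp [chkAll]
    | cons q T' =>
      obtain ⟨d, qq⟩ := q
      rw [List.zip_cons_cons]
      simp only [List.mem_cons, forall_eq_or_imp, chkAll, Bool.and_eq_true, ← ih T',
                 pairChk_iff]

theorem nx_append (a b : List Char) (k : Nat) :
    nx (a ++ b) k = nx a k ++ nx b (k + a.length) := by
  induction a generalizing k with
  | nil => simp [nx]
  | cons c cs ih =>
    by_cases hx : c = 'X' <;> simp [nx, hx, ih] <;> ring_nf

theorem getLast_any_eq_nx (s : List Char) :
    (s.getLast?.any (fun c => c != 'X')) =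
      ((nx s 0).getLast?.map Prod.snd == some (s.length - 1)) := by
  induction s using List.reverseRecOn with
  | nil => simp [nx]
  | append_singleton s' c _ =>
    rw [nx_append, List.getLast?_concat]
    by_cases hx : c = 'X'
    · have h1 : nx [c] (0 + s'.length) = [] := by simp [nx, hx]
      rw [h1, List.append_nil]
      cases hL : (nx s' 0).getLast? with
      | none => simp [hx]
      | some x =>
        have hmem := List.mem_of_getLast? hL
        have hb := nx_mem_bounds s' 0 x hmem
        have hxne : ¬ x.2 = s'.length := by omega
        simp [hx, hxne]
    · have h1 : nx [c] (0 + s'.length) = [(c, 0 + s'.length)] := by simp [nx, hx]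
      rw [h1, List.getLast?_concat]
      have hlen : 0 + s'.length = (s' ++ [c]).length - 1 := by simp
      simp [hx, hlen]

theorem getD_ne_iff_any (o : Option Char) :
    o.getD 'X' ≠ 'X' ↔ (o.any (fun c => c != 'X')) = true := by
  cases o <;> simp

theorem headI_drop_iff (B : List (Char × Nat)) (m : Nat) (h : m < B.length) :
    (B.drop m).headI.1 = 'A' ↔ (B[m]?.map Prod.fst == some 'A') = true := by
  rw [List.drop_eq_getElem_cons h, List.getElem?_eq_getElem h]
  simp [List.headI]

theorem ne_nil_and_getLast_eq (S : List (Char × Nat)) (v : Nat) :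
    (decide (S ≠ []) && (S.getLast?.map Prod.snd == some v)) =
      (S.getLast?.map Prod.snd == some v) := by
  cases S with
  | nil => simp
  | cons p S' => simp

-- the escape disjunction of D_ against the boolean escape of the proof side
theorem eSym_iff (s t : List Char) (ht : t.length = s.length) :
    (eScape s (nx s 0).length (nx t 0) ∨ eScape t (nx t 0).length (nx s 0)) ↔
      ((nx s 0).length ≠ (nx t 0).length ∧
        escape s.length (nx s 0) (nx t 0) = true) := by
  have hdj1s : s.getLast?.getD 'X' ≠ 'X' ↔
      (decide ((nx s 0) ≠ []) &&
        ((nx s 0).getLast?.map Prod.snd == some (s.length - 1))) = true := by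
    rw [ne_nil_and_getLast_eq, getD_ne_iff_any, getLast_any_eq_nx]
  have hdj1t : t.getLast?.getD 'X' ≠ 'X' ↔
      (decide ((nx t 0) ≠ []) &&
        ((nx t 0).getLast?.map Prod.snd == some (s.length - 1))) = true := by
    rw [ne_nil_and_getLast_eq, getD_ne_iff_any, getLast_any_eq_nx, ht]
  by_cases h1 : (nx s 0).length < (nx t 0).length
  · have hord : (nx s 0).length ≤ (nx t 0).length := by omega
    constructor
    · rintro (⟨-, hd⟩ | ⟨hlt, -⟩)
      · refine ⟨by omega, ?_⟩
        simp only [escape, if_pos hord]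
        refine Bool.or_eq_true_iff.mpr ?_
        rcases hd with h | h
        · exact Or.inl (hdj1s.mp h)
        · exact Or.inr ((headI_drop_iff _ _ h1).mp h)
      · omega
    · rintro ⟨-, hesc⟩
      simp only [escape, if_pos hord] at hesc
      refine Or.inl ⟨h1, ?_⟩
      rcases Bool.or_eq_true_iff.mp hesc with h | h
      · exact Or.inl (hdj1s.mpr h)
      · exact Or.inr ((headI_drop_iff _ _ h1).mpr h)
  · by_cases h2 : (nx t 0).length < (nx s 0).length
    · have hord : ¬ (nx s 0).length ≤ (nx t 0).length := by omega
      constructor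
      · rintro (⟨hlt, -⟩ | ⟨-, hd⟩)
        · omega
        · refine ⟨by omega, ?_⟩
          simp only [escape, if_neg hord]
          refine Bool.or_eq_true_iff.mpr ?_
          rcases hd with h | h
          · exact Or.inl (hdj1t.mp h)
          · exact Or.inr ((headI_drop_iff _ _ h2).mp h)
      · rintro ⟨-, hesc⟩
        simp only [escape, if_neg hord] at hesc
        refine Or.inr ⟨h2, ?_⟩
        rcases Bool.or_eq_true_iff.mp hesc with h | h
        · exact Or.inl (hdj1t.mpr h)
        · exact Or.inr ((headI_drop_iff _ _ h2).mpr h)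
    · have he : (nx s 0).length = (nx t 0).length := by omega
      constructor
      · rintro (⟨hlt, -⟩ | ⟨hlt, -⟩) <;> omega
      · rintro ⟨hne, -⟩
        exact absurd he hne

-- D_ in terms of the proof-side helpers
theorem D_iff (start end_ : String) :
    D_caTransform start end_ ↔
      (end_.toList.length = start.toList.length ∧
       (nx start.toList 0).length ≠ (nx end_.toList 0).length ∧
       chkAll (nx start.toList 0) (nx end_.toList 0) = true ∧
       escape start.toList.length (nx start.toList 0) (nx end_.toList 0) = true) := by
  unfold D_caTransform
  simp only [nxD_eq]
  constructor
  · rintro ⟨h1, h2, h3⟩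
    have h4 := (forall_zip_iff_chkAll _ _).mp h3
    have h5 := (eSym_iff start.toList end_.toList h1).mp h2
    exact ⟨h1, h5.1, h4, h5.2⟩
  · rintro ⟨h1, h2, h3, h4⟩
    exact ⟨h1, (eSym_iff start.toList end_.toList h1).mpr ⟨h2, h4⟩,
           (forall_zip_iff_chkAll _ _).mpr h3⟩

-- ===== VERDICT (by name: the statement is the Claim_ definition above) =====
theorem caTransform_spec : Claim_unchanged_caTransform := by
  intro start end_ _hdom
  unfold Spec_caTransform
  intro hnd
  rw [D_iff] at hnd
  by_cases hlen : end_.toList.length = start.toList.length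
  · rw [A_char start end_ hlen]
    show _ = caTransform_alt start end_
    unfold caTransform_alt
    simp only
    rw [if_neg (by omega)]
    by_cases hfil : start.toList.filter (fun c => c != 'X') =
        end_.toList.filter (fun c => c != 'X')
    · have hfst : (nx start.toList 0).map Prod.fst = (nx end_.toList 0).map Prod.fst := by
        rw [← filter_eq_map_fst start.toList 0, ← filter_eq_map_fst end_.toList 0]
        exact hfil
      have hl2 : (nx start.toList 0).length = (nx end_.toList 0).length := by
        have := congrArg List.length hfst
        simpa using this
      rw [if_neg (by exact fun h => h hfil)]
      rw [← chkAll_eq_bLoop start.toList end_.toList hlen hfst]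
      have : ((nx start.toList 0).length == (nx end_.toList 0).length) = true := by
        simp [hl2]
      rw [this]
      simp
    · rw [if_pos (by exact fun h => hfil h)]
      by_cases hl2 : (nx start.toList 0).length = (nx end_.toList 0).length
      · have hfst : (nx start.toList 0).map Prod.fst ≠ (nx end_.toList 0).map Prod.fst := by
          rw [← filter_eq_map_fst start.toList 0, ← filter_eq_map_fst end_.toList 0]
          exact hfil
        rw [chkAll_false_of_fst_ne _ _ hl2 hfst]
        simp
      · have he1 : ((nx start.toList 0).length == (nx end_.toList 0).length) = false := by
          simp [hl2]
        rw [he1, Bool.false_or]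
        have hesc : ¬ (chkAll (nx start.toList 0) (nx end_.toList 0) = true ∧
            escape start.toList.length (nx start.toList 0) (nx end_.toList 0) = true) := by
          intro hc
          exact hnd ⟨hlen, hl2, hc.1, hc.2⟩
        by_cases hchk : chkAll (nx start.toList 0) (nx end_.toList 0) = true
        · have : escape start.toList.length (nx start.toList 0) (nx end_.toList 0) = false := by
            cases h : escape start.toList.length (nx start.toList 0) (nx end_.toList 0)
            · rfl
            · exact absurd ⟨hchk, h⟩ hesc
          rw [hchk, this]
          simp
        · have : chkAll (nx start.toList 0) (nx end_.toList 0) = false := by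
            cases h : chkAll (nx start.toList 0) (nx end_.toList 0)
            · rfl
            · exact absurd h hchk
          rw [this]
          simp
  · have hA : caTransform start end_ = false := if_pos (by omega)
    have hB : caTransform_alt start end_ = false := if_pos (by omega)
    rw [hA, hB]

theorem caTransform_changed : Claim_changed_caTransform := by
  unfold Claim_changed_caTransform; decide

theorem caTransform_tight : Claim_exact_caTransform := by
  intro start end_ _hdom hd
  obtain ⟨hlen, hl2, hchk, hesc⟩ := (D_iff start end_).mp hd
  rw [A_char start end_ hlen]
  have hB : caTransform_alt start end_ = false := by
    unfold caTransform_alt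
    simp only
    rw [if_neg (by omega)]
    have hfil : start.toList.filter (fun c => c != 'X') ≠
        end_.toList.filter (fun c => c != 'X') := by
      intro h
      apply hl2
      have := congrArg List.length h
      rwa [filter_eq_map_fst start.toList 0, filter_eq_map_fst end_.toList 0,
        List.length_map, List.length_map] at this
    rw [if_pos (by exact fun h => hfil h)]
  rw [hB]
  have he1 : ((nx start.toList 0).length == (nx end_.toList 0).length) = false := by
    simp [hl2]
  rw [hchk, he1, Bool.false_or, hesc]
  simp
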